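-- pv_equiv track=rewrite | github.com/wowoduang/AIVideoGPT | app/services/highlight_selector.py | _derive_exchange_pairs
-- ===== SOURCE A (Python) =====
-- from typing import Dict, List
--
-- def _derive_exchange_pairs(speaker_sequence: List[str]) -> List[str]:
--     turns: List[str] = []
--     for item in (speaker_sequence or []):
--         speaker = str(item or "").strip()
--         if not speaker:
--             continue
--         if not turns or speaker != turns[-1]:
--             turns.append(speaker)
--     pairs: List[str] = []
--     for left, right in zip(turns, turns[1:]):
--         if left and right and left != right:
--             pairs.append(f"{left}->{right}")
--     return pairs
-- ===== SOURCE B (Python) =====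
-- from typing import List
--
-- def _derive_exchange_pairs(speaker_sequence: List[str]) -> List[str]:
--     pairs: List[str] = []
--     last = None
--     for item in (speaker_sequence or []):
--         speaker = str(item or "").strip()
--         if not speaker:
--             continue
--         if speaker != last:
--             if last is not None:
--                 pairs.append(f"{last}->{speaker}")
--             last = speaker
--     return pairs
-- ===== Notes on version B (the rewrite author's own statement) =====
-- stated objective: simpler
-- what changed: Single pass keeping only the previous accepted speaker instead of building an intermediate deduplicated turns list and then zipping it with its tail.
import Mathlib
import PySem

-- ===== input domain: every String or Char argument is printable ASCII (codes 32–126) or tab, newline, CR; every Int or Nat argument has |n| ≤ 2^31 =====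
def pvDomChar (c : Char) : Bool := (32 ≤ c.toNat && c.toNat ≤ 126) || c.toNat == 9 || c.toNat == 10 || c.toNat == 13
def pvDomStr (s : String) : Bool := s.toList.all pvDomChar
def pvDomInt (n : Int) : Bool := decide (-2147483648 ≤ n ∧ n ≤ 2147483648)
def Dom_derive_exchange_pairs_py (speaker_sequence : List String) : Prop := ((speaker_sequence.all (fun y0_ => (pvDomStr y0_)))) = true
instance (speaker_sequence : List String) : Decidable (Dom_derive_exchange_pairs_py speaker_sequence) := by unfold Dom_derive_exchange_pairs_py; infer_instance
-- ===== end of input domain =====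

-- B fuses A's two passes into one loop keeping only the previous accepted speaker (simpler: no intermediate turns list).

-- ===== PORT A =====
-- first loop of A: build the adjacent-deduplicated list of non-empty stripped speakers
def pvTurnsStep (turns : List String) (item : String) : List String :=
  let speaker := PySem.Str.strip item
  if speaker = "" then turns
  else if turns = [] ∨ speaker ≠ turns.getLast?.getD "" then turns ++ [speaker]  -- turns[-1] under the guard
  else turns

-- second loop of A: zip turns with its tail and collect "left->right" pairs
def pvPairsStep (pairs : List String) (lr : String × String) : List String :=
  if lr.1 ≠ "" ∧ lr.2 ≠ "" ∧ lr.1 ≠ lr.2 then pairs ++ [lr.1 ++ "->" ++ lr.2] else pairs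

def derive_exchange_pairs_py (speaker_sequence : List String) : List String :=
  let turns := speaker_sequence.foldl pvTurnsStep []
  (turns.zip turns.tail).foldl pvPairsStep []

-- ===== PORT B =====
-- single pass: state is (last accepted speaker, pairs so far)
def pvAltStep (st : Option String × List String) (item : String) : Option String × List String :=
  let speaker := PySem.Str.strip item
  if speaker = "" then st
  else match st.1 with
    | none => (some speaker, st.2)
    | some l => if speaker = l then st else (some speaker, st.2 ++ [l ++ "->" ++ speaker])

def derive_exchange_pairs_py_alt (speaker_sequence : List String) : List String :=
  (speaker_sequence.foldl pvAltStep (none, [])).2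

-- ===== PRECONDITION & SPEC =====
def Spec_derive_exchange_pairs_py (speaker_sequence : List String) (out : List String) : Prop := out = derive_exchange_pairs_py_alt speaker_sequence
instance (speaker_sequence : List String) (out : List String) : Decidable (Spec_derive_exchange_pairs_py speaker_sequence out) := by unfold Spec_derive_exchange_pairs_py; infer_instance

-- ===== CLAIM (what is proved, stated in full; the proofs are below) =====
def Claim_equal_derive_exchange_pairs_py : Prop := ∀ (speaker_sequence : List String), Dom_derive_exchange_pairs_py speaker_sequence → Spec_derive_exchange_pairs_py speaker_sequence (derive_exchange_pairs_py speaker_sequence)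

-- ===== LEMMAS AND PROOFS =====

-- A's pairs for a given turns list
def pvPairsOf (turns : List String) : List String :=
  (turns.zip turns.tail).foldl pvPairsStep []

lemma pvZipSnoc (T : List String) (s : String) (h : T ≠ []) :
    (T ++ [s]).zip (T ++ [s]).tail = T.zip T.tail ++ [(T.getLast?.getD "", s)] := by
  induction T with
  | nil => cases h rfl
  | cons a t ih =>
    cases t with
    | nil => simp
    | cons b t' =>
      have h1 := ih (by simp)
      simp only [List.cons_append, List.tail_cons, List.zip_cons_cons] at h1 ⊢
      rw [h1, List.getLast?_cons_cons]

lemma pvPairsOfSnoc (T : List String) (s : String) (hT : T ≠ [])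
    (hl : T.getLast?.getD "" ≠ "") (hs : s ≠ "") (hne : T.getLast?.getD "" ≠ s) :
    pvPairsOf (T ++ [s]) = pvPairsOf T ++ [T.getLast?.getD "" ++ "->" ++ s] := by
  unfold pvPairsOf
  rw [pvZipSnoc T s hT, List.foldl_append]
  simp only [List.foldl_cons, List.foldl_nil, pvPairsStep]
  rw [if_pos ⟨hl, hs, hne⟩]

lemma pvLastSome (T : List String) (hT : T ≠ []) : T.getLast? = some (T.getLast?.getD "") := by
  cases T with
  | nil => cases hT rfl
  | cons a t =>
    rcases List.getLast?_eq_some_iff.mpr ⟨_, rfl⟩ with h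
    cases hx : (a :: t).getLast? with
    | none => simp at hx
    | some y => simp

-- loop invariant: B's state mirrors (last of turns, pairs of turns)
lemma pvInv (rest : List String) : ∀ T : List String,
    (∀ x, T.getLast? = some x → x ≠ "") →
    pvPairsOf (rest.foldl pvTurnsStep T) = (rest.foldl pvAltStep (T.getLast?, pvPairsOf T)).2 := by
  induction rest with
  | nil => intro T _; rfl
  | cons a rest ih =>
    intro T hT
    simp only [List.foldl_cons]
    by_cases hsp : PySem.Str.strip a = ""
    · rw [show pvTurnsStep T a = T by simp [pvTurnsStep, hsp],
          show pvAltStep (T.getLast?, pvPairsOf T) a = (T.getLast?, pvPairsOf T) by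
            simp [pvAltStep, hsp]]
      exact ih T hT
    · by_cases hTnil : T = []
      · subst hTnil
        rw [show pvTurnsStep [] a = [PySem.Str.strip a] by simp [pvTurnsStep, hsp],
            show pvAltStep ((([] : List String)).getLast?, pvPairsOf []) a
               = (some (PySem.Str.strip a), pvPairsOf [PySem.Str.strip a]) by
              simp [pvAltStep, hsp, pvPairsOf]]
        have := ih [PySem.Str.strip a] (by intro x hx; simp at hx; rw [← hx]; exact hsp)
        simpa [pvPairsOf] using this
      · have hlast : T.getLast? = some (T.getLast?.getD "") := pvLastSome T hTnil
        have hlne : T.getLast?.getD "" ≠ "" := hT _ hlast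
        by_cases heq : PySem.Str.strip a = T.getLast?.getD ""
        · rw [show pvTurnsStep T a = T by simp [pvTurnsStep, hTnil, heq],
              hlast,
              show pvAltStep (some (T.getLast?.getD ""), pvPairsOf T) a
                 = (some (T.getLast?.getD ""), pvPairsOf T) by simp [pvAltStep, heq]]
          rw [← hlast]
          exact ih T hT
        · rw [show pvTurnsStep T a = T ++ [PySem.Str.strip a] by
                simp [pvTurnsStep, hsp, heq],
              hlast,
              show pvAltStep (some (T.getLast?.getD ""), pvPairsOf T) a
                 = (some (PySem.Str.strip a), pvPairsOf T ++ [T.getLast?.getD "" ++ "->" ++ PySem.Str.strip a]) by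
                simp [pvAltStep, hsp, heq]]
          have h1 : (T ++ [PySem.Str.strip a]).getLast? = some (PySem.Str.strip a) := by simp
          have h2 := pvPairsOfSnoc T (PySem.Str.strip a) hTnil hlne hsp (fun h => heq h.symm)
          have := ih (T ++ [PySem.Str.strip a]) (by intro x hx; rw [h1] at hx; cases hx; exact hsp)
          rw [h1, h2] at this
          exact this

-- ===== VERDICT (by name: the statement is the Claim_ definition above) =====
theorem derive_exchange_pairs_py_spec : Claim_equal_derive_exchange_pairs_py := by
  intro s _
  unfold Spec_derive_exchange_pairs_py derive_exchange_pairs_py derive_exchange_pairs_py_alt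
  have := pvInv s [] (by intro x hx; simp at hx)
  simpa [pvPairsOf] using this
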